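-- pv_equiv track=rewrite | github.com/bazoon/algo | ast.py | place_brackets
-- ===== SOURCE A (Python) =====
-- subs = {
-- 	'/': '!',
-- 	'*': '@',
-- 	'+': '$',
-- 	'-': '%'
-- }
--
-- def place_brackets(s, op):
-- 	if op in s:
-- 		op_index = s.index(op)
-- 	else:
-- 		return s
--
-- 	left = s[op_index - 1]
-- 	right = s[op_index + 1]
-- 	rest = s[op_index + 2:]
-- 	prev = s[:op_index - 1]
--
-- 	ns = prev + ['(' +' ' + left +' '+ subs[op] +' ' + right+ ' )'] + rest
-- 	return place_brackets(ns, op)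
-- ===== SOURCE B (Python) =====
-- subs = {
-- 	'/': '!',
-- 	'*': '@',
-- 	'+': '$',
-- 	'-': '%'
-- }
--
-- def place_brackets(s, op):
-- 	sub = subs.get(op)
-- 	if sub is None:
-- 		return s
-- 	result = []
-- 	i = 0
-- 	while i < len(s):
-- 		tok = s[i]
-- 		if tok == op:
-- 			left = result.pop()
-- 			result.append('( ' + left + ' ' + sub + ' ' + s[i + 1] + ' )')
-- 			i += 2
-- 		else:
-- 			result.append(tok)
-- 			i += 1
-- 	return result
-- ===== Notes on version B (the rewrite author's own statement) =====
-- stated objective: alternative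
-- what changed: Replaces A's recursion, whose every step re-scans for the first operator and rebuilds the whole list, with a single left-to-right pass that folds each operator into the last accumulated token.
import Mathlib
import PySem

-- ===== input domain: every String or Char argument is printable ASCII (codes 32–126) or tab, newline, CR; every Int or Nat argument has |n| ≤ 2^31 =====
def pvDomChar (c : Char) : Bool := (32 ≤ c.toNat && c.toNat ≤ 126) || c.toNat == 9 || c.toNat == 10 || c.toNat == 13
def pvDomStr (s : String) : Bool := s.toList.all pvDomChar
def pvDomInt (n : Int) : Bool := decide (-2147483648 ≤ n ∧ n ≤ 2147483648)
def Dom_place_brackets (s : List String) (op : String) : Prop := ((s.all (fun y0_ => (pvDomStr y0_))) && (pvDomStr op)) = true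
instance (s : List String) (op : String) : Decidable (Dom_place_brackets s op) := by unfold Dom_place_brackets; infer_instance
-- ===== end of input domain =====

-- B replaces A's repeated first-operator rewrite (each step re-scans and rebuilds the
-- whole list) with a single left-to-right pass folding each operator into the last
-- accumulated token.

-- ===== PORT A =====
-- the module-level dict 'subs'
def pvSubs : PySem.Dict String String :=
  PySem.Dict.ofList [("/", "!"), ("*", "@"), ("+", "$"), ("-", "%")]

-- A's recursion is not structural (outside Pre_ the Python can even diverge), so the
-- port carries fuel; under Pre_ each step shrinks s by 2, so fuel = s.length is never
-- exhausted there.  The 'none' branches return where Python raises (IndexError /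
-- KeyError) — all outside Pre_.
def placeBracketsFuel : Nat → List String → String → List String
  | 0, s, _ => s
  | fuel + 1, s, op =>
    if op ∈ s then
      match PySem.List.index? s op with
      | none => s  -- unreachable: op ∈ s
      | some opIdx =>
        match PySem.List.pyGet? s ((opIdx : Int) - 1) with
        | none => s  -- Python: IndexError
        | some left =>
          match PySem.List.pyGet? s ((opIdx : Int) + 1) with
          | none => s  -- Python: IndexError
          | some right =>
            match pvSubs.get? op with
            | none => s  -- Python: KeyError
            | some sub =>
              let rest := PySem.List.slice s (some ((opIdx : Int) + 2)) none
              let prev := PySem.List.slice s none (some ((opIdx : Int) - 1))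
              let ns := prev ++ ["(" ++ " " ++ left ++ " " ++ sub ++ " " ++ right ++ " )"] ++ rest
              placeBracketsFuel fuel ns op
    else s

def place_brackets (s : List String) (op : String) : List String :=
  placeBracketsFuel s.length s op

-- ===== PORT B =====
-- B's while loop over index i, ported as structural recursion on the suffix s[i:].
-- The 'res' guards return where Python raises (result.pop() / s[i+1]: IndexError) —
-- outside Pre_.
def pbLoop (op sub : String) (res : List String) : List String → List String
  | [] => res
  | tok :: rest =>
    if tok == op then
      match res.getLast? with
      | none => res  -- Python: result.pop() raises IndexError
      | some left =>
        match rest with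
        | [] => res  -- Python: s[i + 1] raises IndexError
        | right :: rest' =>
          pbLoop op sub (res.dropLast ++ ["( " ++ left ++ " " ++ sub ++ " " ++ right ++ " )"]) rest'
    else pbLoop op sub (res ++ [tok]) rest

def place_brackets_alt (s : List String) (op : String) : List String :=
  match pvSubs.get? op with
  | none => s
  | some sub => pbLoop op sub [] s

-- ===== PRECONDITION & SPEC =====
-- length of the maximal run of op-tokens at the end of s
def pvTrailRun (s : List String) (op : String) : Nat :=
  (s.reverse.takeWhile (· == op)).length

-- Pre_ excludes exactly the inputs on which A raises or diverges: op present in s but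
-- not a key of subs (KeyError, or IndexError at an end), op as the first token
-- (negative-index wraparound: IndexError or infinite recursion), or a trailing run of
-- op-tokens of odd length (the rewriting eventually reads past the end: IndexError).
def Pre_place_brackets (s : List String) (op : String) : Prop :=
  op ∈ s → (op ∈ ["/", "*", "+", "-"] ∧ s.head? ≠ some op ∧ pvTrailRun s op % 2 = 0)
instance (s : List String) (op : String) : Decidable (Pre_place_brackets s op) := by
  unfold Pre_place_brackets; infer_instance

def pvWitness_place_brackets : List String × String := (["a", "+", "b", "+", "c"], "+")

def Spec_place_brackets (s : List String) (op : String) (out : List String) : Prop := out = place_brackets_alt s op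
instance (s : List String) (op : String) (out : List String) : Decidable (Spec_place_brackets s op out) := by unfold Spec_place_brackets; infer_instance

-- ===== CLAIM (what is proved, stated in full; the proofs are below) =====
def Claim_equal_place_brackets : Prop := ∀ (s : List String) (op : String), Dom_place_brackets s op → Pre_place_brackets s op → Spec_place_brackets s op (place_brackets s op)

-- ===== LEMMAS AND PROOFS =====

-- B-side loop equations
theorem pbLoop_cons_ne (op sub x : String) (res rest : List String) (hx : (x == op) = false) :
    pbLoop op sub res (x :: rest) = pbLoop op sub (res ++ [x]) rest := by
  rw [pbLoop, if_neg (by simp [hx])]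

theorem pbLoop_cons_op (op sub left right : String) (res rest : List String)
    (h : res.getLast? = some left) :
    pbLoop op sub res (op :: right :: rest) =
      pbLoop op sub (res.dropLast ++ ["( " ++ left ++ " " ++ sub ++ " " ++ right ++ " )"]) rest := by
  rw [pbLoop, if_pos (by simp), h]

-- B's loop just copies a prefix free of op
theorem pbLoop_no_op {op : String} (sub : String) (pre : List String) (hpre : op ∉ pre) :
    ∀ (res rest : List String), pbLoop op sub res (pre ++ rest) = pbLoop op sub (res ++ pre) rest := by
  induction pre with
  | nil => intro res rest; simp
  | cons x xs ih =>
    intro res rest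
    have hx : (x == op) = false := by
      simp only [beq_eq_false_iff_ne]; rintro rfl; exact hpre (List.mem_cons_self ..)
    rw [List.cons_append, pbLoop_cons_ne _ _ _ _ _ hx,
        ih (fun h => hpre (List.mem_cons_of_mem _ h))]
    simp

theorem pbLoop_id {op : String} (sub : String) (s : List String) (h : op ∉ s) :
    pbLoop op sub [] s = s := by
  have := pbLoop_no_op sub s h [] []
  simpa [pbLoop] using this

-- A does nothing without an occurrence of op
theorem placeBracketsFuel_no_op {op : String} (fuel : Nat) (s : List String) (h : op ∉ s) :
    placeBracketsFuel fuel s op = s := by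
  cases fuel with
  | zero => rfl
  | succ fuel => rw [placeBracketsFuel, if_neg h]

-- one rewriting step of A, on the decomposed list
theorem pbf_step {op sub l right : String} (hsub : pvSubs.get? op = some sub)
    (prev rest : List String) (fuel : Nat) (hprev : op ∉ prev) (hl : l ≠ op) :
    placeBracketsFuel (fuel + 1) (prev ++ l :: op :: right :: rest) op =
      placeBracketsFuel fuel (prev ++ ("(" ++ " " ++ l ++ " " ++ sub ++ " " ++ right ++ " )") :: rest) op := by
  have hmem : op ∈ prev ++ l :: op :: right :: rest := by simp
  have hidx : PySem.List.index? (prev ++ l :: op :: right :: rest) op = some (prev.length + 1) := by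
    rw [PySem.List.index?_eq_some_iff]
    exact ⟨prev ++ [l], right :: rest, by simp, by simp, by
      simp only [List.mem_append, List.mem_singleton]
      rintro (h | rfl)
      · exact hprev h
      · exact hl rfl⟩
  have hcast1 : ((prev.length + 1 : Nat) : Int) - 1 = ((prev.length : Nat) : Int) := by push_cast; ring
  have hleft : PySem.List.pyGet? (prev ++ l :: op :: right :: rest) ((prev.length : Nat) : Int) = some l :=
    PySem.List.pyGet?_append_length ..
  have hcast2 : ((prev.length + 1 : Nat) : Int) + 1 = ((prev.length : Nat) : Int) + 2 := by push_cast; ring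
  have hright : PySem.List.pyGet? (prev ++ l :: op :: right :: rest) (((prev.length : Nat) : Int) + 2) = some right := by
    have := PySem.List.pyGet?_append_right (pre := prev) (ys := l :: op :: right :: rest) (k := 2)
    simpa using this
  have hcast3 : ((prev.length + 1 : Nat) : Int) + 2 = ((prev.length + 3 : Nat) : Int) := by push_cast; ring
  have hrest : PySem.List.slice (prev ++ l :: op :: right :: rest) (some ((prev.length + 3 : Nat) : Int)) none = rest := by
    rw [PySem.List.slice_from_natCast, List.drop_append]
    simp
  have hprevs : PySem.List.slice (prev ++ l :: op :: right :: rest) none (some ((prev.length : Nat) : Int)) = prev := by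
    rw [PySem.List.slice_to_natCast, List.take_left']
    rfl
  rw [placeBracketsFuel, if_pos hmem, hidx]
  simp only [hcast1, hcast2, hcast3, hleft, hright, hsub, hrest, hprevs]
  simp

-- trailing run ignores everything before a suffix that is not all op
theorem trail_not_all {op : String} (u v : List String) (hv : v.all (· == op) = false) :
    pvTrailRun (u ++ v) op = pvTrailRun v op := by
  unfold pvTrailRun
  rw [List.reverse_append, List.takeWhile_append]
  rw [if_neg]
  intro h
  have hpre := List.takeWhile_prefix (l := v.reverse) (p := (· == op))
  have heq : v.reverse.takeWhile (· == op) = v.reverse := hpre.eq_of_length h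
  have : v.reverse.all (· == op) = true :=
    List.all_eq_true.mpr (List.takeWhile_eq_self_iff.mp heq)
  rw [List.all_reverse] at this
  simp [this] at hv

-- trailing run of an all-op suffix stopped by x ≠ op
theorem trail_all {op x : String} (u v : List String) (hx : (x == op) = false)
    (hv : v.all (· == op) = true) :
    pvTrailRun (u ++ x :: v) op = v.length := by
  unfold pvTrailRun
  have hself : v.reverse.takeWhile (· == op) = v.reverse :=
    List.takeWhile_eq_self_iff.mpr (by
      intro y hy
      exact List.all_eq_true.mp hv y (List.mem_reverse.mp hy))
  rw [List.reverse_append, List.reverse_cons, List.append_assoc, List.singleton_append,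
      List.takeWhile_append, if_pos (by rw [hself]), List.takeWhile_cons_of_neg (by simp [hx])]
  simp

-- the bracket token built by A equals the one built by B
theorem bracket_eq (l sub right : String) :
    ("(" ++ " " ++ l ++ " " ++ sub ++ " " ++ right ++ " )" : String) =
      ("( " ++ l ++ " " ++ sub ++ " " ++ right ++ " )" : String) := rfl

-- a bracket token is never the (single-character) operator
theorem bracket_ne_op {op : String} (hop1 : op.length = 1) (l sub right : String) :
    ("(" ++ " " ++ l ++ " " ++ sub ++ " " ++ right ++ " )" : String) ≠ op := by
  intro h
  have := congrArg String.length h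
  rw [hop1] at this
  simp [String.length_append, show String.length " " = 1 from rfl,
        show String.length " )" = 2 from rfl] at this

-- the main invariant: with enough fuel, A's rewriting process equals B's single pass
theorem main_lemma {op sub : String} (hsub : pvSubs.get? op = some sub)
    (hop1 : op.length = 1) :
    ∀ (fuel : Nat) (s : List String), s.length ≤ fuel →
      (op ∈ s → s.head? ≠ some op ∧ pvTrailRun s op % 2 = 0) →
      placeBracketsFuel fuel s op = pbLoop op sub [] s := by
  intro fuel
  induction fuel with
  | zero =>
    intro s hlen _
    have hnil : s = [] := List.eq_nil_of_length_eq_zero (Nat.le_zero.mp hlen)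
    subst hnil; rfl
  | succ fuel ih =>
    intro s hlen hpre
    by_cases hmem : op ∈ s
    · obtain ⟨hhead, hpar⟩ := hpre hmem
      obtain ⟨k, hk⟩ := Option.isSome_iff_exists.mp ((PySem.List.index?_isSome_iff s op).mpr hmem)
      obtain ⟨pre, suf, hs, -, hnop⟩ := (PySem.List.index?_eq_some_iff s op k).mp hk
      rcases List.eq_nil_or_concat pre with rfl | ⟨prev, l, rfl⟩
      · exact absurd (by rw [hs]; rfl) hhead
      rw [List.concat_eq_append] at hnop hs
      have hprev : op ∉ prev := fun h => hnop (List.mem_append_left _ h)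
      have hl : l ≠ op := fun h => hnop (List.mem_append_right _ (by simp [h]))
      have hlb : (l == op) = false := beq_eq_false_iff_ne.mpr hl
      have hbr := bracket_ne_op hop1
      cases suf with
      | nil =>
        exfalso
        have h1 : s = prev ++ l :: [op] := by rw [hs]; simp
        rw [h1, trail_all prev [op] hlb (by simp)] at hpar
        simp at hpar
      | cons right rest =>
        have h1 : s = prev ++ l :: op :: right :: rest := by rw [hs]; simp
        subst h1
        set br : String := "(" ++ " " ++ l ++ " " ++ sub ++ " " ++ right ++ " )" with hbrdef
        rw [pbf_step hsub prev rest fuel hprev hl]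
        have hlen' : (prev ++ br :: rest).length ≤ fuel := by
          simp at hlen ⊢; omega
        have hpre' : op ∈ prev ++ br :: rest →
            (prev ++ br :: rest).head? ≠ some op ∧ pvTrailRun (prev ++ br :: rest) op % 2 = 0 := by
        -- head and trailing-run-parity invariants survive one rewriting step
          intro _
          constructor
          · cases prev with
            | nil => simpa using fun h => (hbr l sub right) h
            | cons p ps => simpa using (by simpa using hhead)
          · by_cases hall : rest.all (· == op) = true
            · by_cases hr : (right == op) = true
              · have hvall : (op :: right :: rest).all (· == op) = true := by
                  simp [hall, hr]
                rw [trail_all prev (op :: right :: rest) hlb hvall] at hpar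
                rw [trail_all prev rest (beq_eq_false_iff_ne.mpr (hbr l sub right)) hall]
                simp at hpar
                omega
              · have e1 : prev ++ l :: op :: right :: rest
                    = (prev ++ [l] ++ [op]) ++ right :: rest := by simp
                rw [e1, trail_all (prev ++ [l] ++ [op]) rest
                      (by simpa using hr) hall] at hpar
                rw [trail_all prev rest (beq_eq_false_iff_ne.mpr (hbr l sub right)) hall]
                exact hpar
            · have hallf : rest.all (· == op) = false := by
                cases h : rest.all (· == op) with
                | false => rfl
                | true => exact absurd h hall
              have e1 : prev ++ l :: op :: right :: rest
                  = (prev ++ [l] ++ [op] ++ [right]) ++ rest := by simp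
              have e2 : prev ++ br :: rest = (prev ++ [br]) ++ rest := by simp
              rw [e1, trail_not_all _ rest hallf] at hpar
              rw [e2, trail_not_all _ rest hallf]
              exact hpar
        rw [ih (prev ++ br :: rest) hlen' hpre']
        -- B's pass takes the same step
        have hB1 : pbLoop op sub [] (prev ++ l :: op :: right :: rest)
            = pbLoop op sub (prev ++ [("( " ++ l ++ " " ++ sub ++ " " ++ right ++ " )" : String)]) rest := by
          have e : prev ++ l :: op :: right :: rest = (prev ++ [l]) ++ op :: right :: rest := by simp
          rw [e, pbLoop_no_op sub (prev ++ [l]) hnop [] (op :: right :: rest),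
              List.nil_append,
              pbLoop_cons_op op sub l right (prev ++ [l]) rest (by simp),
              List.dropLast_concat]
        have hB2 : pbLoop op sub [] (prev ++ br :: rest)
            = pbLoop op sub (prev ++ [br]) rest := by
          have e : prev ++ br :: rest = (prev ++ [br]) ++ rest := by simp
          have hnop2 : op ∉ prev ++ [br] := by
            simp only [List.mem_append, List.mem_singleton]
            rintro (h | h)
            · exact hprev h
            · exact hbr l sub right h.symm
          rw [e, pbLoop_no_op sub (prev ++ [br]) hnop2 [] rest, List.nil_append]
        rw [hB1, hB2, hbrdef, bracket_eq]
    · rw [placeBracketsFuel_no_op _ _ hmem, pbLoop_id sub s hmem]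

-- ===== VERDICT (by name: the statement is the Claim_ definition above) =====
theorem place_brackets_spec : Claim_equal_place_brackets := by
  intro s op _ hpre
  unfold Spec_place_brackets place_brackets place_brackets_alt
  by_cases hmem : op ∈ s
  · obtain ⟨hkey, hhead, hpar⟩ := hpre hmem
    have hex : ∃ sub, pvSubs.get? op = some sub ∧ op.length = 1 := by
      simp only [List.mem_cons, List.not_mem_nil, or_false] at hkey
      rcases hkey with rfl | rfl | rfl | rfl <;> exact ⟨_, rfl, rfl⟩
    obtain ⟨sub, hsub, hop1⟩ := hex
    rw [hsub]
    exact main_lemma hsub hop1 s.length s le_rfl (fun _ => ⟨hhead, hpar⟩)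
  · rw [placeBracketsFuel_no_op _ _ hmem]
    cases h : pvSubs.get? op with
    | none => rfl
    | some sub => exact (pbLoop_id sub s hmem).symm
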